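-- pv_equiv track=rewrite | github.com/saidworks/saidworks.github.io | _scripts/migrate_cheatsheets.py | resolve_category_tags
-- ===== SOURCE A (Python) =====
-- DIR_MAP = {
--     "AI/agentic": ("AI", ["ai", "agentic"]),
--     "AI/ai_assistants": ("AI", ["ai", "assistants", "tools"]),
--     "AI/inference": ("AI", ["ai", "inference", "llm"]),
--     "AI": ("AI", ["ai"]),
--     "algorithms": ("CS Fundamentals", ["algorithms"]),
--     "API/openapi_specs": ("DevOps", ["api", "openapi"]),
--     "API": ("DevOps", ["api"]),
--     "build_tools": ("DevOps", ["build-tools"]),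
--     "c_language": ("Programming", ["c", "language"]),
--     "crm/salesforce": ("Tools", ["crm", "salesforce"]),
--     "crm": ("Tools", ["crm"]),
--     "cs_fundamentals/OOP": ("CS Fundamentals", ["cs", "oop"]),
--     "cs_fundamentals": ("CS Fundamentals", ["cs"]),
--     "databases/postgres": ("Databases", ["postgres", "sql", "database"]),
--     "databases/sql": ("Databases", ["sql", "database"]),
--     "databases": ("Databases", ["database"]),
--     "data_engineering/bigdata": ("Data Engineering", ["data", "bigdata"]),
--     "data_engineering": ("Data Engineering", ["data"]),
--     "devOps/cloud_computing/AWS": ("DevOps", ["cloud", "aws", "devops"]),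
--     "devOps/cloud_computing": ("DevOps", ["cloud", "devops"]),
--     "devOps/devenv": ("DevOps", ["devops", "devenv"]),
--     "devOps/jenkins": ("DevOps", ["devops", "jenkins", "ci-cd"]),
--     "devOps": ("DevOps", ["devops"]),
--     "frameworks/Angular": ("Frontend", ["angular", "framework"]),
--     "frameworks/DotNet": ("Backend", ["dotnet", "csharp"]),
--     "frameworks/Laravel": ("Backend", ["laravel", "php"]),
--     "frameworks/Spring": ("Backend", ["spring", "java"]),
--     "frameworks/Vue.js": ("Frontend", ["vuejs", "framework"]),
--     "frameworks": ("Backend", ["framework"]),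
--     "frontend_fundamentals/css": ("Frontend", ["css", "frontend"]),
--     "frontend_fundamentals/design_tools": ("Frontend", ["design", "tools"]),
--     "frontend_fundamentals/HTML": ("Frontend", ["html", "frontend"]),
--     "frontend_fundamentals/javascript": ("Frontend", ["javascript", "frontend"]),
--     "frontend_fundamentals": ("Frontend", ["frontend"]),
--     "git": ("Tools", ["git", "version-control"]),
--     "ide/Pycharm": ("Tools", ["ide", "pycharm"]),
--     "ide/vs_code": ("Tools", ["ide", "vscode"]),
--     "ide": ("Tools", ["ide"]),
--     "iot/raspberry_pi": ("IoT", ["raspberry-pi", "iot"]),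
--     "iot": ("IoT", ["iot"]),
--     "java": ("Programming", ["java"]),
--     "linux/wsl": ("DevOps", ["linux", "wsl"]),
--     "linux": ("DevOps", ["linux", "cli"]),
--     "markdown": ("Tools", ["markdown"]),
--     "php/htaccess": ("Programming", ["php", "htaccess"]),
--     "php": ("Programming", ["php"]),
--     "Python": ("Programming", ["python"]),
--     "scripting": ("Programming", ["scripting", "shell"]),
--     "system_design": ("Architecture", ["system-design", "architecture"]),
--     "udacity_mac": ("Tools", ["udacity", "mac"]),
-- }
--
-- def resolve_category_tags(rel_dir):
--     """Find the best matching directory mapping."""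
--     rel_dir = str(rel_dir).replace('\\', '/')
--     # Try longest prefix first
--     parts = rel_dir.split('/')
--     for i in range(len(parts), 0, -1):
--         key = '/'.join(parts[:i])
--         if key in DIR_MAP:
--             return DIR_MAP[key]
--     return ("Uncategorized", [])
-- ===== SOURCE B (Python) =====
-- # The directory mapping kept as a compact text table (one "key|category|tag,tag" line each),
-- # parsed once at import; the lookup walks the path's segments forward, growing the prefix
-- # and keeping the value of the deepest prefix present in the table.
-- _TABLE = [
--     "AI/agentic|AI|ai,agentic",
--     "AI/ai_assistants|AI|ai,assistants,tools",
--     "AI/inference|AI|ai,inference,llm",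
--     "AI|AI|ai",
--     "algorithms|CS Fundamentals|algorithms",
--     "API/openapi_specs|DevOps|api,openapi",
--     "API|DevOps|api",
--     "build_tools|DevOps|build-tools",
--     "c_language|Programming|c,language",
--     "crm/salesforce|Tools|crm,salesforce",
--     "crm|Tools|crm",
--     "cs_fundamentals/OOP|CS Fundamentals|cs,oop",
--     "cs_fundamentals|CS Fundamentals|cs",
--     "databases/postgres|Databases|postgres,sql,database",
--     "databases/sql|Databases|sql,database",
--     "databases|Databases|database",
--     "data_engineering/bigdata|Data Engineering|data,bigdata",
--     "data_engineering|Data Engineering|data",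
--     "devOps/cloud_computing/AWS|DevOps|cloud,aws,devops",
--     "devOps/cloud_computing|DevOps|cloud,devops",
--     "devOps/devenv|DevOps|devops,devenv",
--     "devOps/jenkins|DevOps|devops,jenkins,ci-cd",
--     "devOps|DevOps|devops",
--     "frameworks/Angular|Frontend|angular,framework",
--     "frameworks/DotNet|Backend|dotnet,csharp",
--     "frameworks/Laravel|Backend|laravel,php",
--     "frameworks/Spring|Backend|spring,java",
--     "frameworks/Vue.js|Frontend|vuejs,framework",
--     "frameworks|Backend|framework",
--     "frontend_fundamentals/css|Frontend|css,frontend",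
--     "frontend_fundamentals/design_tools|Frontend|design,tools",
--     "frontend_fundamentals/HTML|Frontend|html,frontend",
--     "frontend_fundamentals/javascript|Frontend|javascript,frontend",
--     "frontend_fundamentals|Frontend|frontend",
--     "git|Tools|git,version-control",
--     "ide/Pycharm|Tools|ide,pycharm",
--     "ide/vs_code|Tools|ide,vscode",
--     "ide|Tools|ide",
--     "iot/raspberry_pi|IoT|raspberry-pi,iot",
--     "iot|IoT|iot",
--     "java|Programming|java",
--     "linux/wsl|DevOps|linux,wsl",
--     "linux|DevOps|linux,cli",
--     "markdown|Tools|markdown",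
--     "php/htaccess|Programming|php,htaccess",
--     "php|Programming|php",
--     "Python|Programming|python",
--     "scripting|Programming|scripting,shell",
--     "system_design|Architecture|system-design,architecture",
--     "udacity_mac|Tools|udacity,mac",
-- ]
--
-- def _parse(lines):
--     d = {}
--     for line in lines:
--         key, cat, tags = line.split('|')
--         d[key] = (cat, tags.split(','))
--     return d
--
-- DIR_MAP = _parse(_TABLE)
--
-- def resolve_category_tags(rel_dir):
--     """Find the best matching directory mapping."""
--     rel_dir = str(rel_dir).replace('\\', '/')
--     best = ("Uncategorized", [])
--     prefix = None
--     for part in rel_dir.split('/'):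
--         prefix = part if prefix is None else prefix + '/' + part
--         if prefix in DIR_MAP:
--             best = DIR_MAP[prefix]
--     return best
-- ===== Notes on version B (the rewrite author's own statement) =====
-- stated objective: alternative
-- what changed: B stores the mapping as a compact one-line-per-entry text table parsed once into a dict, and resolves by walking the path's segments forward, growing the prefix and keeping the value of the deepest prefix present, instead of A's backward probe of successively shorter slash-joined prefixes against a dict literal.
import Mathlib
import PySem

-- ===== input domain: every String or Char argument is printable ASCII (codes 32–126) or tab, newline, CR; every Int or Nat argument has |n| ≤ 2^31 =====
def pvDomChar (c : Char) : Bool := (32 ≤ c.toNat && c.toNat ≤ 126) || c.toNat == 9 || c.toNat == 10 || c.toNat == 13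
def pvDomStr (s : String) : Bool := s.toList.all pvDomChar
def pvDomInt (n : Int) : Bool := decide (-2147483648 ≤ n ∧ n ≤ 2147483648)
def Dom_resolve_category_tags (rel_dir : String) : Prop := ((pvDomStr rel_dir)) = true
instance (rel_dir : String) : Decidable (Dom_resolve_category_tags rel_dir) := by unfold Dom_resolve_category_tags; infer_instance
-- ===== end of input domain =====

-- B keeps the mapping as a text table parsed into a dict and resolves by a forward walk over the
-- path's segments keeping the deepest prefix present, instead of A's backward probe of
-- successively shorter joined prefixes (objective: alternative).

-- ===== PORT A =====
def DIR_MAP : PySem.Dict String (String × List String) := PySem.Dict.mk [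
  ("AI/agentic", ("AI", ["ai", "agentic"])),
  ("AI/ai_assistants", ("AI", ["ai", "assistants", "tools"])),
  ("AI/inference", ("AI", ["ai", "inference", "llm"])),
  ("AI", ("AI", ["ai"])),
  ("algorithms", ("CS Fundamentals", ["algorithms"])),
  ("API/openapi_specs", ("DevOps", ["api", "openapi"])),
  ("API", ("DevOps", ["api"])),
  ("build_tools", ("DevOps", ["build-tools"])),
  ("c_language", ("Programming", ["c", "language"])),
  ("crm/salesforce", ("Tools", ["crm", "salesforce"])),
  ("crm", ("Tools", ["crm"])),
  ("cs_fundamentals/OOP", ("CS Fundamentals", ["cs", "oop"])),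
  ("cs_fundamentals", ("CS Fundamentals", ["cs"])),
  ("databases/postgres", ("Databases", ["postgres", "sql", "database"])),
  ("databases/sql", ("Databases", ["sql", "database"])),
  ("databases", ("Databases", ["database"])),
  ("data_engineering/bigdata", ("Data Engineering", ["data", "bigdata"])),
  ("data_engineering", ("Data Engineering", ["data"])),
  ("devOps/cloud_computing/AWS", ("DevOps", ["cloud", "aws", "devops"])),
  ("devOps/cloud_computing", ("DevOps", ["cloud", "devops"])),
  ("devOps/devenv", ("DevOps", ["devops", "devenv"])),
  ("devOps/jenkins", ("DevOps", ["devops", "jenkins", "ci-cd"])),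
  ("devOps", ("DevOps", ["devops"])),
  ("frameworks/Angular", ("Frontend", ["angular", "framework"])),
  ("frameworks/DotNet", ("Backend", ["dotnet", "csharp"])),
  ("frameworks/Laravel", ("Backend", ["laravel", "php"])),
  ("frameworks/Spring", ("Backend", ["spring", "java"])),
  ("frameworks/Vue.js", ("Frontend", ["vuejs", "framework"])),
  ("frameworks", ("Backend", ["framework"])),
  ("frontend_fundamentals/css", ("Frontend", ["css", "frontend"])),
  ("frontend_fundamentals/design_tools", ("Frontend", ["design", "tools"])),
  ("frontend_fundamentals/HTML", ("Frontend", ["html", "frontend"])),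
  ("frontend_fundamentals/javascript", ("Frontend", ["javascript", "frontend"])),
  ("frontend_fundamentals", ("Frontend", ["frontend"])),
  ("git", ("Tools", ["git", "version-control"])),
  ("ide/Pycharm", ("Tools", ["ide", "pycharm"])),
  ("ide/vs_code", ("Tools", ["ide", "vscode"])),
  ("ide", ("Tools", ["ide"])),
  ("iot/raspberry_pi", ("IoT", ["raspberry-pi", "iot"])),
  ("iot", ("IoT", ["iot"])),
  ("java", ("Programming", ["java"])),
  ("linux/wsl", ("DevOps", ["linux", "wsl"])),
  ("linux", ("DevOps", ["linux", "cli"])),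
  ("markdown", ("Tools", ["markdown"])),
  ("php/htaccess", ("Programming", ["php", "htaccess"])),
  ("php", ("Programming", ["php"])),
  ("Python", ("Programming", ["python"])),
  ("scripting", ("Programming", ["scripting", "shell"])),
  ("system_design", ("Architecture", ["system-design", "architecture"])),
  ("udacity_mac", ("Tools", ["udacity", "mac"]))
]

-- the loop 'for i in range(len(parts), 0, -1): … return DIR_MAP[key] …' of A
def resolveGoA (parts : List String) : List Int → String × List String
  | [] => ("Uncategorized", [])
  | i :: rest =>
    let key := PySem.Str.join "/" (PySem.List.slice parts none (some i))
    match DIR_MAP.get? key with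
    | some v => v
    | none => resolveGoA parts rest

def resolve_category_tags (rel_dir : String) : String × List String :=
  let rel_dir := PySem.Str.replace rel_dir "\\" "/"
  let parts : List String := (PySem.Str.split? rel_dir "/").getD []   -- sep "/" is nonempty, always some
  resolveGoA parts (PySem.List.pyRange (parts.length : Int) 0 (-1))

-- ===== PORT B =====
-- Source B's _TABLE: one "key|category|tag,tag" line per mapping entry
def pvTable : List String := [
  "AI/agentic|AI|ai,agentic",
  "AI/ai_assistants|AI|ai,assistants,tools",
  "AI/inference|AI|ai,inference,llm",
  "AI|AI|ai",
  "algorithms|CS Fundamentals|algorithms",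
  "API/openapi_specs|DevOps|api,openapi",
  "API|DevOps|api",
  "build_tools|DevOps|build-tools",
  "c_language|Programming|c,language",
  "crm/salesforce|Tools|crm,salesforce",
  "crm|Tools|crm",
  "cs_fundamentals/OOP|CS Fundamentals|cs,oop",
  "cs_fundamentals|CS Fundamentals|cs",
  "databases/postgres|Databases|postgres,sql,database",
  "databases/sql|Databases|sql,database",
  "databases|Databases|database",
  "data_engineering/bigdata|Data Engineering|data,bigdata",
  "data_engineering|Data Engineering|data",
  "devOps/cloud_computing/AWS|DevOps|cloud,aws,devops",
  "devOps/cloud_computing|DevOps|cloud,devops",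
  "devOps/devenv|DevOps|devops,devenv",
  "devOps/jenkins|DevOps|devops,jenkins,ci-cd",
  "devOps|DevOps|devops",
  "frameworks/Angular|Frontend|angular,framework",
  "frameworks/DotNet|Backend|dotnet,csharp",
  "frameworks/Laravel|Backend|laravel,php",
  "frameworks/Spring|Backend|spring,java",
  "frameworks/Vue.js|Frontend|vuejs,framework",
  "frameworks|Backend|framework",
  "frontend_fundamentals/css|Frontend|css,frontend",
  "frontend_fundamentals/design_tools|Frontend|design,tools",
  "frontend_fundamentals/HTML|Frontend|html,frontend",
  "frontend_fundamentals/javascript|Frontend|javascript,frontend",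
  "frontend_fundamentals|Frontend|frontend",
  "git|Tools|git,version-control",
  "ide/Pycharm|Tools|ide,pycharm",
  "ide/vs_code|Tools|ide,vscode",
  "ide|Tools|ide",
  "iot/raspberry_pi|IoT|raspberry-pi,iot",
  "iot|IoT|iot",
  "java|Programming|java",
  "linux/wsl|DevOps|linux,wsl",
  "linux|DevOps|linux,cli",
  "markdown|Tools|markdown",
  "php/htaccess|Programming|php,htaccess",
  "php|Programming|php",
  "Python|Programming|python",
  "scripting|Programming|scripting,shell",
  "system_design|Architecture|system-design,architecture",
  "udacity_mac|Tools|udacity,mac"]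

-- body of Source B's _parse loop: 'key, cat, tags = line.split("|"); d[key] = (cat, tags.split(","))'
def pvParseLine (d : PySem.Dict String (String × List String)) (line : String) :
    PySem.Dict String (String × List String) :=
  match (PySem.Str.split? line "|").getD [] with
  | [key, cat, tags] => d.insert key (cat, (PySem.Str.split? tags ",").getD [])
  | _ => d   -- unreachable: every table line has exactly three fields (Python would raise)

-- Source B's module-level DIR_MAP = _parse(_TABLE)
def B_DIR_MAP : PySem.Dict String (String × List String) :=
  pvTable.foldl pvParseLine PySem.Dict.empty

-- Source B's loop: 'for part in parts: prefix = …; if prefix in DIR_MAP: best = DIR_MAP[prefix]'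
def resolveLoopB (d : PySem.Dict String (String × List String)) (prefix? : Option String)
    (best : String × List String) : List String → String × List String
  | [] => best
  | part :: rest =>
    let pfx := match prefix? with
      | none => part
      | some p => p ++ "/" ++ part
    match d.get? pfx with
    | some v => resolveLoopB d (some pfx) v rest
    | none => resolveLoopB d (some pfx) best rest

def resolve_category_tags_alt (rel_dir : String) : String × List String :=
  let t := PySem.Str.replace rel_dir "\\" "/"
  resolveLoopB B_DIR_MAP none ("Uncategorized", []) ((PySem.Str.split? t "/").getD [])

-- ===== PRECONDITION & SPEC =====
def Spec_resolve_category_tags (rel_dir : String) (out : String × List String) : Prop := out = resolve_category_tags_alt rel_dir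
instance (rel_dir : String) (out : String × List String) : Decidable (Spec_resolve_category_tags rel_dir out) := by unfold Spec_resolve_category_tags; infer_instance

-- ===== CLAIM (what is proved, stated in full; the proofs are below) =====
def Claim_equal_resolve_category_tags : Prop := ∀ (rel_dir : String), Dom_resolve_category_tags rel_dir → Spec_resolve_category_tags rel_dir (resolve_category_tags rel_dir)

-- ===== LEMMAS AND PROOFS =====

theorem pvPL0 (d : PySem.Dict String (String × List String)) : pvParseLine d "AI/agentic|AI|ai,agentic" = d.insert "AI/agentic" ("AI", ["ai", "agentic"]) := by
  have h1 : (PySem.Str.split? "AI/agentic|AI|ai,agentic" "|").getD [] = ["AI/agentic", "AI", "ai,agentic"] := by decide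
  have h2 : (PySem.Str.split? "ai,agentic" ",").getD [] = ["ai", "agentic"] := by decide
  rw [pvParseLine, h1]
  simp only [h2]

theorem pvPL1 (d : PySem.Dict String (String × List String)) : pvParseLine d "AI/ai_assistants|AI|ai,assistants,tools" = d.insert "AI/ai_assistants" ("AI", ["ai", "assistants", "tools"]) := by
  have h1 : (PySem.Str.split? "AI/ai_assistants|AI|ai,assistants,tools" "|").getD [] = ["AI/ai_assistants", "AI", "ai,assistants,tools"] := by decide
  have h2 : (PySem.Str.split? "ai,assistants,tools" ",").getD [] = ["ai", "assistants", "tools"] := by decide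
  rw [pvParseLine, h1]
  simp only [h2]

theorem pvPL2 (d : PySem.Dict String (String × List String)) : pvParseLine d "AI/inference|AI|ai,inference,llm" = d.insert "AI/inference" ("AI", ["ai", "inference", "llm"]) := by
  have h1 : (PySem.Str.split? "AI/inference|AI|ai,inference,llm" "|").getD [] = ["AI/inference", "AI", "ai,inference,llm"] := by decide
  have h2 : (PySem.Str.split? "ai,inference,llm" ",").getD [] = ["ai", "inference", "llm"] := by decide
  rw [pvParseLine, h1]
  simp only [h2]

theorem pvPL3 (d : PySem.Dict String (String × List String)) : pvParseLine d "AI|AI|ai" = d.insert "AI" ("AI", ["ai"]) := by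
  have h1 : (PySem.Str.split? "AI|AI|ai" "|").getD [] = ["AI", "AI", "ai"] := by decide
  have h2 : (PySem.Str.split? "ai" ",").getD [] = ["ai"] := by decide
  rw [pvParseLine, h1]
  simp only [h2]

theorem pvPL4 (d : PySem.Dict String (String × List String)) : pvParseLine d "algorithms|CS Fundamentals|algorithms" = d.insert "algorithms" ("CS Fundamentals", ["algorithms"]) := by
  have h1 : (PySem.Str.split? "algorithms|CS Fundamentals|algorithms" "|").getD [] = ["algorithms", "CS Fundamentals", "algorithms"] := by decide
  have h2 : (PySem.Str.split? "algorithms" ",").getD [] = ["algorithms"] := by decide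
  rw [pvParseLine, h1]
  simp only [h2]

theorem pvPL5 (d : PySem.Dict String (String × List String)) : pvParseLine d "API/openapi_specs|DevOps|api,openapi" = d.insert "API/openapi_specs" ("DevOps", ["api", "openapi"]) := by
  have h1 : (PySem.Str.split? "API/openapi_specs|DevOps|api,openapi" "|").getD [] = ["API/openapi_specs", "DevOps", "api,openapi"] := by decide
  have h2 : (PySem.Str.split? "api,openapi" ",").getD [] = ["api", "openapi"] := by decide
  rw [pvParseLine, h1]
  simp only [h2]

theorem pvPL6 (d : PySem.Dict String (String × List String)) : pvParseLine d "API|DevOps|api" = d.insert "API" ("DevOps", ["api"]) := by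
  have h1 : (PySem.Str.split? "API|DevOps|api" "|").getD [] = ["API", "DevOps", "api"] := by decide
  have h2 : (PySem.Str.split? "api" ",").getD [] = ["api"] := by decide
  rw [pvParseLine, h1]
  simp only [h2]

theorem pvPL7 (d : PySem.Dict String (String × List String)) : pvParseLine d "build_tools|DevOps|build-tools" = d.insert "build_tools" ("DevOps", ["build-tools"]) := by
  have h1 : (PySem.Str.split? "build_tools|DevOps|build-tools" "|").getD [] = ["build_tools", "DevOps", "build-tools"] := by decide
  have h2 : (PySem.Str.split? "build-tools" ",").getD [] = ["build-tools"] := by decide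
  rw [pvParseLine, h1]
  simp only [h2]

theorem pvPL8 (d : PySem.Dict String (String × List String)) : pvParseLine d "c_language|Programming|c,language" = d.insert "c_language" ("Programming", ["c", "language"]) := by
  have h1 : (PySem.Str.split? "c_language|Programming|c,language" "|").getD [] = ["c_language", "Programming", "c,language"] := by decide
  have h2 : (PySem.Str.split? "c,language" ",").getD [] = ["c", "language"] := by decide
  rw [pvParseLine, h1]
  simp only [h2]

theorem pvPL9 (d : PySem.Dict String (String × List String)) : pvParseLine d "crm/salesforce|Tools|crm,salesforce" = d.insert "crm/salesforce" ("Tools", ["crm", "salesforce"]) := by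
  have h1 : (PySem.Str.split? "crm/salesforce|Tools|crm,salesforce" "|").getD [] = ["crm/salesforce", "Tools", "crm,salesforce"] := by decide
  have h2 : (PySem.Str.split? "crm,salesforce" ",").getD [] = ["crm", "salesforce"] := by decide
  rw [pvParseLine, h1]
  simp only [h2]

theorem pvPL10 (d : PySem.Dict String (String × List String)) : pvParseLine d "crm|Tools|crm" = d.insert "crm" ("Tools", ["crm"]) := by
  have h1 : (PySem.Str.split? "crm|Tools|crm" "|").getD [] = ["crm", "Tools", "crm"] := by decide
  have h2 : (PySem.Str.split? "crm" ",").getD [] = ["crm"] := by decide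
  rw [pvParseLine, h1]
  simp only [h2]

theorem pvPL11 (d : PySem.Dict String (String × List String)) : pvParseLine d "cs_fundamentals/OOP|CS Fundamentals|cs,oop" = d.insert "cs_fundamentals/OOP" ("CS Fundamentals", ["cs", "oop"]) := by
  have h1 : (PySem.Str.split? "cs_fundamentals/OOP|CS Fundamentals|cs,oop" "|").getD [] = ["cs_fundamentals/OOP", "CS Fundamentals", "cs,oop"] := by decide
  have h2 : (PySem.Str.split? "cs,oop" ",").getD [] = ["cs", "oop"] := by decide
  rw [pvParseLine, h1]
  simp only [h2]

theorem pvPL12 (d : PySem.Dict String (String × List String)) : pvParseLine d "cs_fundamentals|CS Fundamentals|cs" = d.insert "cs_fundamentals" ("CS Fundamentals", ["cs"]) := by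
  have h1 : (PySem.Str.split? "cs_fundamentals|CS Fundamentals|cs" "|").getD [] = ["cs_fundamentals", "CS Fundamentals", "cs"] := by decide
  have h2 : (PySem.Str.split? "cs" ",").getD [] = ["cs"] := by decide
  rw [pvParseLine, h1]
  simp only [h2]

theorem pvPL13 (d : PySem.Dict String (String × List String)) : pvParseLine d "databases/postgres|Databases|postgres,sql,database" = d.insert "databases/postgres" ("Databases", ["postgres", "sql", "database"]) := by
  have h1 : (PySem.Str.split? "databases/postgres|Databases|postgres,sql,database" "|").getD [] = ["databases/postgres", "Databases", "postgres,sql,database"] := by decide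
  have h2 : (PySem.Str.split? "postgres,sql,database" ",").getD [] = ["postgres", "sql", "database"] := by decide
  rw [pvParseLine, h1]
  simp only [h2]

theorem pvPL14 (d : PySem.Dict String (String × List String)) : pvParseLine d "databases/sql|Databases|sql,database" = d.insert "databases/sql" ("Databases", ["sql", "database"]) := by
  have h1 : (PySem.Str.split? "databases/sql|Databases|sql,database" "|").getD [] = ["databases/sql", "Databases", "sql,database"] := by decide
  have h2 : (PySem.Str.split? "sql,database" ",").getD [] = ["sql", "database"] := by decide
  rw [pvParseLine, h1]
  simp only [h2]

theorem pvPL15 (d : PySem.Dict String (String × List String)) : pvParseLine d "databases|Databases|database" = d.insert "databases" ("Databases", ["database"]) := by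
  have h1 : (PySem.Str.split? "databases|Databases|database" "|").getD [] = ["databases", "Databases", "database"] := by decide
  have h2 : (PySem.Str.split? "database" ",").getD [] = ["database"] := by decide
  rw [pvParseLine, h1]
  simp only [h2]

theorem pvPL16 (d : PySem.Dict String (String × List String)) : pvParseLine d "data_engineering/bigdata|Data Engineering|data,bigdata" = d.insert "data_engineering/bigdata" ("Data Engineering", ["data", "bigdata"]) := by
  have h1 : (PySem.Str.split? "data_engineering/bigdata|Data Engineering|data,bigdata" "|").getD [] = ["data_engineering/bigdata", "Data Engineering", "data,bigdata"] := by decide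
  have h2 : (PySem.Str.split? "data,bigdata" ",").getD [] = ["data", "bigdata"] := by decide
  rw [pvParseLine, h1]
  simp only [h2]

theorem pvPL17 (d : PySem.Dict String (String × List String)) : pvParseLine d "data_engineering|Data Engineering|data" = d.insert "data_engineering" ("Data Engineering", ["data"]) := by
  have h1 : (PySem.Str.split? "data_engineering|Data Engineering|data" "|").getD [] = ["data_engineering", "Data Engineering", "data"] := by decide
  have h2 : (PySem.Str.split? "data" ",").getD [] = ["data"] := by decide
  rw [pvParseLine, h1]
  simp only [h2]

theorem pvPL18 (d : PySem.Dict String (String × List String)) : pvParseLine d "devOps/cloud_computing/AWS|DevOps|cloud,aws,devops" = d.insert "devOps/cloud_computing/AWS" ("DevOps", ["cloud", "aws", "devops"]) := by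
  have h1 : (PySem.Str.split? "devOps/cloud_computing/AWS|DevOps|cloud,aws,devops" "|").getD [] = ["devOps/cloud_computing/AWS", "DevOps", "cloud,aws,devops"] := by decide
  have h2 : (PySem.Str.split? "cloud,aws,devops" ",").getD [] = ["cloud", "aws", "devops"] := by decide
  rw [pvParseLine, h1]
  simp only [h2]

theorem pvPL19 (d : PySem.Dict String (String × List String)) : pvParseLine d "devOps/cloud_computing|DevOps|cloud,devops" = d.insert "devOps/cloud_computing" ("DevOps", ["cloud", "devops"]) := by
  have h1 : (PySem.Str.split? "devOps/cloud_computing|DevOps|cloud,devops" "|").getD [] = ["devOps/cloud_computing", "DevOps", "cloud,devops"] := by decide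
  have h2 : (PySem.Str.split? "cloud,devops" ",").getD [] = ["cloud", "devops"] := by decide
  rw [pvParseLine, h1]
  simp only [h2]

theorem pvPL20 (d : PySem.Dict String (String × List String)) : pvParseLine d "devOps/devenv|DevOps|devops,devenv" = d.insert "devOps/devenv" ("DevOps", ["devops", "devenv"]) := by
  have h1 : (PySem.Str.split? "devOps/devenv|DevOps|devops,devenv" "|").getD [] = ["devOps/devenv", "DevOps", "devops,devenv"] := by decide
  have h2 : (PySem.Str.split? "devops,devenv" ",").getD [] = ["devops", "devenv"] := by decide
  rw [pvParseLine, h1]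
  simp only [h2]

theorem pvPL21 (d : PySem.Dict String (String × List String)) : pvParseLine d "devOps/jenkins|DevOps|devops,jenkins,ci-cd" = d.insert "devOps/jenkins" ("DevOps", ["devops", "jenkins", "ci-cd"]) := by
  have h1 : (PySem.Str.split? "devOps/jenkins|DevOps|devops,jenkins,ci-cd" "|").getD [] = ["devOps/jenkins", "DevOps", "devops,jenkins,ci-cd"] := by decide
  have h2 : (PySem.Str.split? "devops,jenkins,ci-cd" ",").getD [] = ["devops", "jenkins", "ci-cd"] := by decide
  rw [pvParseLine, h1]
  simp only [h2]

theorem pvPL22 (d : PySem.Dict String (String × List String)) : pvParseLine d "devOps|DevOps|devops" = d.insert "devOps" ("DevOps", ["devops"]) := by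
  have h1 : (PySem.Str.split? "devOps|DevOps|devops" "|").getD [] = ["devOps", "DevOps", "devops"] := by decide
  have h2 : (PySem.Str.split? "devops" ",").getD [] = ["devops"] := by decide
  rw [pvParseLine, h1]
  simp only [h2]

theorem pvPL23 (d : PySem.Dict String (String × List String)) : pvParseLine d "frameworks/Angular|Frontend|angular,framework" = d.insert "frameworks/Angular" ("Frontend", ["angular", "framework"]) := by
  have h1 : (PySem.Str.split? "frameworks/Angular|Frontend|angular,framework" "|").getD [] = ["frameworks/Angular", "Frontend", "angular,framework"] := by decide
  have h2 : (PySem.Str.split? "angular,framework" ",").getD [] = ["angular", "framework"] := by decide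
  rw [pvParseLine, h1]
  simp only [h2]

theorem pvPL24 (d : PySem.Dict String (String × List String)) : pvParseLine d "frameworks/DotNet|Backend|dotnet,csharp" = d.insert "frameworks/DotNet" ("Backend", ["dotnet", "csharp"]) := by
  have h1 : (PySem.Str.split? "frameworks/DotNet|Backend|dotnet,csharp" "|").getD [] = ["frameworks/DotNet", "Backend", "dotnet,csharp"] := by decide
  have h2 : (PySem.Str.split? "dotnet,csharp" ",").getD [] = ["dotnet", "csharp"] := by decide
  rw [pvParseLine, h1]
  simp only [h2]

theorem pvPL25 (d : PySem.Dict String (String × List String)) : pvParseLine d "frameworks/Laravel|Backend|laravel,php" = d.insert "frameworks/Laravel" ("Backend", ["laravel", "php"]) := by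
  have h1 : (PySem.Str.split? "frameworks/Laravel|Backend|laravel,php" "|").getD [] = ["frameworks/Laravel", "Backend", "laravel,php"] := by decide
  have h2 : (PySem.Str.split? "laravel,php" ",").getD [] = ["laravel", "php"] := by decide
  rw [pvParseLine, h1]
  simp only [h2]

theorem pvPL26 (d : PySem.Dict String (String × List String)) : pvParseLine d "frameworks/Spring|Backend|spring,java" = d.insert "frameworks/Spring" ("Backend", ["spring", "java"]) := by
  have h1 : (PySem.Str.split? "frameworks/Spring|Backend|spring,java" "|").getD [] = ["frameworks/Spring", "Backend", "spring,java"] := by decide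
  have h2 : (PySem.Str.split? "spring,java" ",").getD [] = ["spring", "java"] := by decide
  rw [pvParseLine, h1]
  simp only [h2]

theorem pvPL27 (d : PySem.Dict String (String × List String)) : pvParseLine d "frameworks/Vue.js|Frontend|vuejs,framework" = d.insert "frameworks/Vue.js" ("Frontend", ["vuejs", "framework"]) := by
  have h1 : (PySem.Str.split? "frameworks/Vue.js|Frontend|vuejs,framework" "|").getD [] = ["frameworks/Vue.js", "Frontend", "vuejs,framework"] := by decide
  have h2 : (PySem.Str.split? "vuejs,framework" ",").getD [] = ["vuejs", "framework"] := by decide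
  rw [pvParseLine, h1]
  simp only [h2]

theorem pvPL28 (d : PySem.Dict String (String × List String)) : pvParseLine d "frameworks|Backend|framework" = d.insert "frameworks" ("Backend", ["framework"]) := by
  have h1 : (PySem.Str.split? "frameworks|Backend|framework" "|").getD [] = ["frameworks", "Backend", "framework"] := by decide
  have h2 : (PySem.Str.split? "framework" ",").getD [] = ["framework"] := by decide
  rw [pvParseLine, h1]
  simp only [h2]

theorem pvPL29 (d : PySem.Dict String (String × List String)) : pvParseLine d "frontend_fundamentals/css|Frontend|css,frontend" = d.insert "frontend_fundamentals/css" ("Frontend", ["css", "frontend"]) := by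
  have h1 : (PySem.Str.split? "frontend_fundamentals/css|Frontend|css,frontend" "|").getD [] = ["frontend_fundamentals/css", "Frontend", "css,frontend"] := by decide
  have h2 : (PySem.Str.split? "css,frontend" ",").getD [] = ["css", "frontend"] := by decide
  rw [pvParseLine, h1]
  simp only [h2]

theorem pvPL30 (d : PySem.Dict String (String × List String)) : pvParseLine d "frontend_fundamentals/design_tools|Frontend|design,tools" = d.insert "frontend_fundamentals/design_tools" ("Frontend", ["design", "tools"]) := by
  have h1 : (PySem.Str.split? "frontend_fundamentals/design_tools|Frontend|design,tools" "|").getD [] = ["frontend_fundamentals/design_tools", "Frontend", "design,tools"] := by decide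
  have h2 : (PySem.Str.split? "design,tools" ",").getD [] = ["design", "tools"] := by decide
  rw [pvParseLine, h1]
  simp only [h2]

theorem pvPL31 (d : PySem.Dict String (String × List String)) : pvParseLine d "frontend_fundamentals/HTML|Frontend|html,frontend" = d.insert "frontend_fundamentals/HTML" ("Frontend", ["html", "frontend"]) := by
  have h1 : (PySem.Str.split? "frontend_fundamentals/HTML|Frontend|html,frontend" "|").getD [] = ["frontend_fundamentals/HTML", "Frontend", "html,frontend"] := by decide
  have h2 : (PySem.Str.split? "html,frontend" ",").getD [] = ["html", "frontend"] := by decide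
  rw [pvParseLine, h1]
  simp only [h2]

theorem pvPL32 (d : PySem.Dict String (String × List String)) : pvParseLine d "frontend_fundamentals/javascript|Frontend|javascript,frontend" = d.insert "frontend_fundamentals/javascript" ("Frontend", ["javascript", "frontend"]) := by
  have h1 : (PySem.Str.split? "frontend_fundamentals/javascript|Frontend|javascript,frontend" "|").getD [] = ["frontend_fundamentals/javascript", "Frontend", "javascript,frontend"] := by decide
  have h2 : (PySem.Str.split? "javascript,frontend" ",").getD [] = ["javascript", "frontend"] := by decide
  rw [pvParseLine, h1]
  simp only [h2]

theorem pvPL33 (d : PySem.Dict String (String × List String)) : pvParseLine d "frontend_fundamentals|Frontend|frontend" = d.insert "frontend_fundamentals" ("Frontend", ["frontend"]) := by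
  have h1 : (PySem.Str.split? "frontend_fundamentals|Frontend|frontend" "|").getD [] = ["frontend_fundamentals", "Frontend", "frontend"] := by decide
  have h2 : (PySem.Str.split? "frontend" ",").getD [] = ["frontend"] := by decide
  rw [pvParseLine, h1]
  simp only [h2]

theorem pvPL34 (d : PySem.Dict String (String × List String)) : pvParseLine d "git|Tools|git,version-control" = d.insert "git" ("Tools", ["git", "version-control"]) := by
  have h1 : (PySem.Str.split? "git|Tools|git,version-control" "|").getD [] = ["git", "Tools", "git,version-control"] := by decide
  have h2 : (PySem.Str.split? "git,version-control" ",").getD [] = ["git", "version-control"] := by decide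
  rw [pvParseLine, h1]
  simp only [h2]

theorem pvPL35 (d : PySem.Dict String (String × List String)) : pvParseLine d "ide/Pycharm|Tools|ide,pycharm" = d.insert "ide/Pycharm" ("Tools", ["ide", "pycharm"]) := by
  have h1 : (PySem.Str.split? "ide/Pycharm|Tools|ide,pycharm" "|").getD [] = ["ide/Pycharm", "Tools", "ide,pycharm"] := by decide
  have h2 : (PySem.Str.split? "ide,pycharm" ",").getD [] = ["ide", "pycharm"] := by decide
  rw [pvParseLine, h1]
  simp only [h2]

theorem pvPL36 (d : PySem.Dict String (String × List String)) : pvParseLine d "ide/vs_code|Tools|ide,vscode" = d.insert "ide/vs_code" ("Tools", ["ide", "vscode"]) := by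
  have h1 : (PySem.Str.split? "ide/vs_code|Tools|ide,vscode" "|").getD [] = ["ide/vs_code", "Tools", "ide,vscode"] := by decide
  have h2 : (PySem.Str.split? "ide,vscode" ",").getD [] = ["ide", "vscode"] := by decide
  rw [pvParseLine, h1]
  simp only [h2]

theorem pvPL37 (d : PySem.Dict String (String × List String)) : pvParseLine d "ide|Tools|ide" = d.insert "ide" ("Tools", ["ide"]) := by
  have h1 : (PySem.Str.split? "ide|Tools|ide" "|").getD [] = ["ide", "Tools", "ide"] := by decide
  have h2 : (PySem.Str.split? "ide" ",").getD [] = ["ide"] := by decide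
  rw [pvParseLine, h1]
  simp only [h2]

theorem pvPL38 (d : PySem.Dict String (String × List String)) : pvParseLine d "iot/raspberry_pi|IoT|raspberry-pi,iot" = d.insert "iot/raspberry_pi" ("IoT", ["raspberry-pi", "iot"]) := by
  have h1 : (PySem.Str.split? "iot/raspberry_pi|IoT|raspberry-pi,iot" "|").getD [] = ["iot/raspberry_pi", "IoT", "raspberry-pi,iot"] := by decide
  have h2 : (PySem.Str.split? "raspberry-pi,iot" ",").getD [] = ["raspberry-pi", "iot"] := by decide
  rw [pvParseLine, h1]
  simp only [h2]

theorem pvPL39 (d : PySem.Dict String (String × List String)) : pvParseLine d "iot|IoT|iot" = d.insert "iot" ("IoT", ["iot"]) := by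
  have h1 : (PySem.Str.split? "iot|IoT|iot" "|").getD [] = ["iot", "IoT", "iot"] := by decide
  have h2 : (PySem.Str.split? "iot" ",").getD [] = ["iot"] := by decide
  rw [pvParseLine, h1]
  simp only [h2]

theorem pvPL40 (d : PySem.Dict String (String × List String)) : pvParseLine d "java|Programming|java" = d.insert "java" ("Programming", ["java"]) := by
  have h1 : (PySem.Str.split? "java|Programming|java" "|").getD [] = ["java", "Programming", "java"] := by decide
  have h2 : (PySem.Str.split? "java" ",").getD [] = ["java"] := by decide
  rw [pvParseLine, h1]
  simp only [h2]

theorem pvPL41 (d : PySem.Dict String (String × List String)) : pvParseLine d "linux/wsl|DevOps|linux,wsl" = d.insert "linux/wsl" ("DevOps", ["linux", "wsl"]) := by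
  have h1 : (PySem.Str.split? "linux/wsl|DevOps|linux,wsl" "|").getD [] = ["linux/wsl", "DevOps", "linux,wsl"] := by decide
  have h2 : (PySem.Str.split? "linux,wsl" ",").getD [] = ["linux", "wsl"] := by decide
  rw [pvParseLine, h1]
  simp only [h2]

theorem pvPL42 (d : PySem.Dict String (String × List String)) : pvParseLine d "linux|DevOps|linux,cli" = d.insert "linux" ("DevOps", ["linux", "cli"]) := by
  have h1 : (PySem.Str.split? "linux|DevOps|linux,cli" "|").getD [] = ["linux", "DevOps", "linux,cli"] := by decide
  have h2 : (PySem.Str.split? "linux,cli" ",").getD [] = ["linux", "cli"] := by decide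
  rw [pvParseLine, h1]
  simp only [h2]

theorem pvPL43 (d : PySem.Dict String (String × List String)) : pvParseLine d "markdown|Tools|markdown" = d.insert "markdown" ("Tools", ["markdown"]) := by
  have h1 : (PySem.Str.split? "markdown|Tools|markdown" "|").getD [] = ["markdown", "Tools", "markdown"] := by decide
  have h2 : (PySem.Str.split? "markdown" ",").getD [] = ["markdown"] := by decide
  rw [pvParseLine, h1]
  simp only [h2]

theorem pvPL44 (d : PySem.Dict String (String × List String)) : pvParseLine d "php/htaccess|Programming|php,htaccess" = d.insert "php/htaccess" ("Programming", ["php", "htaccess"]) := by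
  have h1 : (PySem.Str.split? "php/htaccess|Programming|php,htaccess" "|").getD [] = ["php/htaccess", "Programming", "php,htaccess"] := by decide
  have h2 : (PySem.Str.split? "php,htaccess" ",").getD [] = ["php", "htaccess"] := by decide
  rw [pvParseLine, h1]
  simp only [h2]

theorem pvPL45 (d : PySem.Dict String (String × List String)) : pvParseLine d "php|Programming|php" = d.insert "php" ("Programming", ["php"]) := by
  have h1 : (PySem.Str.split? "php|Programming|php" "|").getD [] = ["php", "Programming", "php"] := by decide
  have h2 : (PySem.Str.split? "php" ",").getD [] = ["php"] := by decide
  rw [pvParseLine, h1]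
  simp only [h2]

theorem pvPL46 (d : PySem.Dict String (String × List String)) : pvParseLine d "Python|Programming|python" = d.insert "Python" ("Programming", ["python"]) := by
  have h1 : (PySem.Str.split? "Python|Programming|python" "|").getD [] = ["Python", "Programming", "python"] := by decide
  have h2 : (PySem.Str.split? "python" ",").getD [] = ["python"] := by decide
  rw [pvParseLine, h1]
  simp only [h2]

theorem pvPL47 (d : PySem.Dict String (String × List String)) : pvParseLine d "scripting|Programming|scripting,shell" = d.insert "scripting" ("Programming", ["scripting", "shell"]) := by
  have h1 : (PySem.Str.split? "scripting|Programming|scripting,shell" "|").getD [] = ["scripting", "Programming", "scripting,shell"] := by decide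
  have h2 : (PySem.Str.split? "scripting,shell" ",").getD [] = ["scripting", "shell"] := by decide
  rw [pvParseLine, h1]
  simp only [h2]

theorem pvPL48 (d : PySem.Dict String (String × List String)) : pvParseLine d "system_design|Architecture|system-design,architecture" = d.insert "system_design" ("Architecture", ["system-design", "architecture"]) := by
  have h1 : (PySem.Str.split? "system_design|Architecture|system-design,architecture" "|").getD [] = ["system_design", "Architecture", "system-design,architecture"] := by decide
  have h2 : (PySem.Str.split? "system-design,architecture" ",").getD [] = ["system-design", "architecture"] := by decide
  rw [pvParseLine, h1]
  simp only [h2]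

theorem pvPL49 (d : PySem.Dict String (String × List String)) : pvParseLine d "udacity_mac|Tools|udacity,mac" = d.insert "udacity_mac" ("Tools", ["udacity", "mac"]) := by
  have h1 : (PySem.Str.split? "udacity_mac|Tools|udacity,mac" "|").getD [] = ["udacity_mac", "Tools", "udacity,mac"] := by decide
  have h2 : (PySem.Str.split? "udacity,mac" ",").getD [] = ["udacity", "mac"] := by decide
  rw [pvParseLine, h1]
  simp only [h2]

-- B's parsed table is A's dict literal
set_option maxRecDepth 10000 in
theorem pvTable_eq : B_DIR_MAP = DIR_MAP := by
  rw [B_DIR_MAP, pvTable]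
  simp only [List.foldl_cons, List.foldl_nil, pvPL0, pvPL1, pvPL2, pvPL3, pvPL4, pvPL5, pvPL6, pvPL7, pvPL8, pvPL9, pvPL10, pvPL11, pvPL12, pvPL13, pvPL14, pvPL15, pvPL16, pvPL17, pvPL18, pvPL19, pvPL20, pvPL21, pvPL22, pvPL23, pvPL24, pvPL25, pvPL26, pvPL27, pvPL28, pvPL29, pvPL30, pvPL31, pvPL32, pvPL33, pvPL34, pvPL35, pvPL36, pvPL37, pvPL38, pvPL39, pvPL40, pvPL41, pvPL42, pvPL43, pvPL44, pvPL45, pvPL46, pvPL47, pvPL48, pvPL49]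
  decide

def pvSsplit : List Char → List (List Char)
  | [] => [[]]
  | c :: r => if c = '/' then [] :: pvSsplit r else (pvSsplit r).modifyHead (c :: ·)

def pvJn : List (List Char) → List Char
  | [] => []
  | [p] => p
  | p :: q :: r => p ++ '/' :: pvJn (q :: r)

theorem pvSsplit_ne_nil (cs : List Char) : pvSsplit cs ≠ [] := by
  cases cs with
  | nil => simp [pvSsplit]
  | cons c r =>
    have := pvSsplit_ne_nil r
    simp only [pvSsplit]
    split
    · simp
    · cases hr : pvSsplit r with
      | nil => exact absurd hr this
      | cons p ps => simp

theorem pvGo_eq (fuel : Nat) : ∀ (l cur : List Char) (accs : List (List Char)),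
    l.length < fuel →
    PySem.Chars.splitOn.go ['/'] fuel l cur accs = accs.reverse ++ (pvSsplit l).modifyHead (cur.reverse ++ ·) := by
  induction fuel with
  | zero => intro l cur accs h; omega
  | succ f ih =>
    intro l cur accs h
    cases l with
    | nil =>
      simp [PySem.Chars.splitOn.go, pvSsplit]
    | cons c rest =>
      rw [PySem.Chars.splitOn.go]
      by_cases hc : c = '/'
      · subst hc
        simp only [List.isPrefixOf, BEq.rfl, Bool.true_and, if_pos]
        rw [ih _ _ _ (by simpa using Nat.lt_of_succ_lt_succ h)]
        obtain ⟨p, ps, hps⟩ : ∃ p ps, pvSsplit rest = p :: ps := by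
          cases hr : pvSsplit rest with
          | nil => exact absurd hr (pvSsplit_ne_nil rest)
          | cons p ps => exact ⟨p, ps, rfl⟩
        simp [pvSsplit, hps]
      · have : List.isPrefixOf ['/'] (c :: rest) = false := by
          simp [List.isPrefixOf]
          intro hh; exact absurd hh.symm hc
        rw [this, if_neg (by simp : ¬(false = true))]
        rw [ih _ _ _ (by simpa using Nat.lt_of_succ_lt_succ h)]
        obtain ⟨p, ps, hps⟩ : ∃ p ps, pvSsplit rest = p :: ps := by
          cases hr : pvSsplit rest with
          | nil => exact absurd hr (pvSsplit_ne_nil rest)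
          | cons p ps => exact ⟨p, ps, rfl⟩
        simp [pvSsplit, hps, if_neg hc]

theorem pvSplitOn_eq (cs : List Char) : PySem.Chars.splitOn cs ['/'] = pvSsplit cs := by
  rw [PySem.Chars.splitOn, pvGo_eq _ _ _ _ (by omega)]
  obtain ⟨p, ps, hps⟩ : ∃ p ps, pvSsplit cs = p :: ps := by
    cases hr : pvSsplit cs with
    | nil => exact absurd hr (pvSsplit_ne_nil cs)
    | cons p ps => exact ⟨p, ps, rfl⟩
  simp [hps]

theorem pvJn_cons (p : List Char) (q : List Char) (r : List (List Char)) :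
    pvJn (p :: q :: r) = p ++ '/' :: pvJn (q :: r) := rfl

theorem pvJn_append (xs ys : List (List Char)) (hx : xs ≠ []) (hy : ys ≠ []) :
    pvJn (xs ++ ys) = pvJn xs ++ '/' :: pvJn ys := by
  induction xs with
  | nil => exact absurd rfl hx
  | cons p ps ih =>
    cases ps with
    | nil =>
      cases ys with
      | nil => exact absurd rfl hy
      | cons q qs => simp [pvJn_cons, pvJn]
    | cons q qs =>
      have h2 := ih (by simp)
      simp only [List.cons_append, pvJn_cons] at h2 ⊢
      rw [h2]
      simp

theorem pvJoin_eq_jn (ps : List (List Char)) : PySem.Chars.join ['/'] ps = pvJn ps := by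
  rw [PySem.Chars.join]
  induction ps with
  | nil => simp [pvJn, List.intercalate]
  | cons p q ih =>
    cases q with
    | nil => simp [pvJn, List.intercalate]
    | cons q qs =>
      rw [pvJn_cons, ← ih]
      simp [List.intercalate, List.intersperse]

def pvKeyL (cs : List Char) (i : Nat) : List Char := pvJn ((pvSsplit cs).take i)

theorem pvKeyL_succ (cs : List Char) (i : Nat) (h1 : 1 ≤ i) (h2 : i < (pvSsplit cs).length) :
    pvKeyL cs (i + 1) = pvKeyL cs i ++ '/' :: (pvSsplit cs)[i]'h2 := by
  have hx : (pvSsplit cs).take i ≠ [] := by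
    have : ((pvSsplit cs).take i).length = min i (pvSsplit cs).length := by simp
    intro hnil; rw [hnil] at this; simp at this; omega
  rw [pvKeyL, pvKeyL, List.take_add_one, List.getElem?_eq_getElem h2]
  rw [pvJn_append _ _ hx (by simp)]
  rfl

-- pyRange n 0 (-1) is the descending list [n, …, 1]
def pvDesc : Nat → List Int
  | 0 => []
  | m+1 => ((m+1 : Nat) : Int) :: pvDesc m

theorem pvDesc_eq (n : Nat) : (List.range n).map (fun (k : Nat) => (n : Int) + (-1) * (k : Int)) = pvDesc n := by
  induction n with
  | zero => simp [pvDesc]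
  | succ m ih =>
    rw [List.range_succ_eq_map]
    simp only [List.map_cons, List.map_map, pvDesc]
    rw [List.cons_eq_cons]
    refine ⟨by push_cast; ring, ?_⟩
    rw [← ih]
    refine List.map_congr_left (fun k _ => ?_)
    simp [Function.comp]

theorem pvPyRange_desc (n : Nat) : PySem.List.pyRange (n : Int) 0 (-1) = pvDesc n := by
  rw [PySem.List.pyRange]
  rw [if_neg (by norm_num)]
  have h1 : ¬ ((0 : Int) < -1) := by norm_num
  rw [if_neg h1]
  by_cases hn : (0 : Int) < (n : Int)
  · rw [if_pos hn]
    have : (((n : Int) - 0 + -(-1) - 1) / -(-1)).toNat = n := by norm_num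
    rw [this, ← pvDesc_eq]
  · rw [if_neg hn]
    have : n = 0 := by omega
    subst this
    simp [pvDesc]

-- the maximal 1 ≤ i ≤ m whose joined prefix is a key of the table (none if no hit)
def pvBestA (cs : List Char) : Nat → Option Nat
  | 0 => none
  | m+1 => if (DIR_MAP.get? (String.ofList (pvKeyL cs (m+1)))).isSome then some (m+1) else pvBestA cs m

-- the result both programs produce from a best index
def pvRes (cs : List Char) : Option Nat → String × List String
  | none => ("Uncategorized", [])
  | some i => (DIR_MAP.get? (String.ofList (pvKeyL cs i))).getD ("Uncategorized", [])

theorem pvParts_eq (t : String) :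
    (PySem.Str.split? t "/").getD [] = (pvSsplit t.toList).map String.ofList := by
  rw [PySem.Str.split?, PySem.Chars.split?]
  have hsep : ("/" : String).toList = ['/'] := rfl
  rw [hsep]
  simp [pvSplitOn_eq]

theorem pvKey_eq (t : String) (i : Nat) :
    PySem.Str.join "/" (PySem.List.slice ((pvSsplit t.toList).map String.ofList) none (some (i : Int))) =
      String.ofList (pvKeyL t.toList i) := by
  rw [PySem.List.slice_to _ (by positivity)]
  have h : (PySem.Str.join "/" (List.take ((i : Int)).toNat ((pvSsplit t.toList).map String.ofList))).toList
      = pvKeyL t.toList i := by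
    rw [PySem.Str.toList_join]
    have hsep : ("/" : String).toList = ['/'] := rfl
    rw [hsep, pvJoin_eq_jn]
    rw [← List.map_take, List.map_map]
    have : (String.toList ∘ String.ofList) = id := by
      funext l; simp
    rw [this, List.map_id, Int.toNat_natCast]
    rfl
  calc PySem.Str.join "/" _ = String.ofList (PySem.Str.join "/" _).toList := by rw [String.ofList_toList]
    _ = String.ofList (pvKeyL t.toList i) := by rw [h]

theorem pvGoA_desc (t : String) (m : Nat) :
    resolveGoA ((pvSsplit t.toList).map String.ofList) (pvDesc m) = pvRes t.toList (pvBestA t.toList m) := by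
  induction m with
  | zero => simp [pvDesc, resolveGoA, pvBestA, pvRes]
  | succ m ih =>
    rw [pvDesc, resolveGoA, pvKey_eq t (m+1), pvBestA]
    cases hget : DIR_MAP.get? (String.ofList (pvKeyL t.toList (m+1))) with
    | some v => simp [hget, pvRes]
    | none => simp [ih, pvRes]

theorem pvOfList_slash (a b : List Char) :
    String.ofList a ++ "/" ++ String.ofList b = String.ofList (a ++ '/' :: b) := by
  apply String.toList_inj.mp
  simp [String.toList_append]

theorem pvLoopB_nil (d : PySem.Dict String (String × List String)) (p : Option String)
    (b : String × List String) : resolveLoopB d p b [] = b := rfl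

theorem pvLoopB_cons_none (d : PySem.Dict String (String × List String)) (b : String × List String)
    (part : String) (rest : List String) :
    resolveLoopB d none b (part :: rest) =
      (match d.get? part with
       | some v => resolveLoopB d (some part) v rest
       | none => resolveLoopB d (some part) b rest) := rfl

theorem pvLoopB_cons_some (d : PySem.Dict String (String × List String)) (p : String)
    (b : String × List String) (part : String) (rest : List String) :
    resolveLoopB d (some p) b (part :: rest) =
      (match d.get? (p ++ "/" ++ part) with
       | some v => resolveLoopB d (some (p ++ "/" ++ part)) v rest
       | none => resolveLoopB d (some (p ++ "/" ++ part)) b rest) := rfl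

-- forward-walk invariant: from segment j on with the best-so-far of the first j segments,
-- B's loop ends with the best over all n segments
theorem pvLoopB_inv (t : String) (k : Nat) : ∀ (j : Nat), 1 ≤ j →
    j + k = (pvSsplit t.toList).length →
    resolveLoopB DIR_MAP (some (String.ofList (pvKeyL t.toList j))) (pvRes t.toList (pvBestA t.toList j))
        (((pvSsplit t.toList).drop j).map String.ofList) =
      pvRes t.toList (pvBestA t.toList (pvSsplit t.toList).length) := by
  induction k with
  | zero =>
    intro j h1 hjk
    have : j = (pvSsplit t.toList).length := by omega
    subst this
    simp [pvLoopB_nil]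
  | succ k ih =>
    intro j h1 hjk
    have hj : j < (pvSsplit t.toList).length := by omega
    rw [List.drop_eq_getElem_cons hj, List.map_cons, pvLoopB_cons_some]
    rw [pvOfList_slash, ← pvKeyL_succ t.toList j h1 hj]
    have hbs : pvBestA t.toList (j+1) =
        if (DIR_MAP.get? (String.ofList (pvKeyL t.toList (j+1)))).isSome then some (j+1)
        else pvBestA t.toList j := rfl
    cases hget : DIR_MAP.get? (String.ofList (pvKeyL t.toList (j+1))) with
    | some v =>
      have : pvRes t.toList (pvBestA t.toList (j+1)) = v := by
        rw [hbs, hget]; simp [pvRes, hget]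
      rw [← this]
      exact ih (j+1) (by omega) (by omega)
    | none =>
      have : pvRes t.toList (pvBestA t.toList (j+1)) = pvRes t.toList (pvBestA t.toList j) := by
        rw [hbs, hget]; simp
      rw [← this]
      exact ih (j+1) (by omega) (by omega)

-- ===== VERDICT (by name: the statement is the Claim_ definition above) =====
theorem resolve_category_tags_spec : Claim_equal_resolve_category_tags := by
  intro rel_dir _
  unfold Spec_resolve_category_tags
  set t := PySem.Str.replace rel_dir "\\" "/" with ht
  have hA : resolve_category_tags rel_dir = pvRes t.toList (pvBestA t.toList (pvSsplit t.toList).length) := by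
    show resolveGoA ((PySem.Str.split? t "/").getD [])
        (PySem.List.pyRange (((PySem.Str.split? t "/").getD []).length : Int) 0 (-1)) = _
    rw [pvParts_eq, List.length_map, pvPyRange_desc, pvGoA_desc]
  have hB : resolve_category_tags_alt rel_dir =
      resolveLoopB DIR_MAP none ("Uncategorized", []) ((pvSsplit t.toList).map String.ofList) := by
    show resolveLoopB B_DIR_MAP none ("Uncategorized", []) ((PySem.Str.split? t "/").getD []) = _
    rw [pvParts_eq, pvTable_eq]
  rw [hA, hB]
  obtain ⟨p, ps, hps⟩ : ∃ p ps, pvSsplit t.toList = p :: ps := by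
    cases hr : pvSsplit t.toList with
    | nil => exact absurd hr (pvSsplit_ne_nil t.toList)
    | cons p ps => exact ⟨p, ps, rfl⟩
  rw [hps, List.map_cons, pvLoopB_cons_none]
  have hk1 : String.ofList (pvKeyL t.toList 1) = String.ofList p := by
    rw [pvKeyL, hps]; rfl
  have hinv := pvLoopB_inv t ps.length 1 (le_refl 1) (by rw [hps, List.length_cons]; omega)
  rw [hps] at hinv
  simp only [List.drop_one, List.tail_cons, hk1] at hinv
  have hb1 : pvBestA t.toList 1 =
      if (DIR_MAP.get? (String.ofList (pvKeyL t.toList 1))).isSome then some 1 else none := rfl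
  cases hget : DIR_MAP.get? (String.ofList p) with
  | some v =>
    have hres : pvRes t.toList (pvBestA t.toList 1) = v := by
      rw [hb1, hk1, hget]; simp [pvRes, hk1, hget]
    rw [← hres]
    exact hinv.symm
  | none =>
    have hres : pvRes t.toList (pvBestA t.toList 1) = ("Uncategorized", []) := by
      rw [hb1, hk1, hget]; simp [pvRes]
    rw [← hres]
    exact hinv.symm
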